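-- pv_equiv track=rewrite | github.com/hieunugent/pythonProjectEuler | leetcodes/memorycheck.py | functionCheck
-- ===== SOURCE A (Python) =====
-- def functionCheck(value, arr1, arr2):
--     result = []
--     secondResult = []
--     maxvalue = 0
--     for i in range (len(arr1)):
--         target = value - arr1[i][1]
--         for j in range(len(arr2)):
--             if target == arr2[j][1]:
--                 result.append([arr1[i][0], arr2[j][0]])
--             elif target > arr2[j][1]:
--                 sum = arr1[i][1] +arr2[j][1]
--                 if sum > maxvalue:
--                     maxvalue = sum
--                     secondResult.append([arr1[i][0], arr2[j][0]])
--     if result: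
--         return result
--     if secondResult:
--         return [secondResult[-1]]
--     else:
--         return [[]]
-- ===== SOURCE B (Python) =====
-- from bisect import bisect_left
--
-- def functionCheck(value, arr1, arr2):
--     # index arr2 by its value column: value -> ids in arr2 order
--     ids_by_val = {}
--     for b in arr2:
--         ids_by_val.setdefault(b[1], []).append(b[0])
--     # exact matches by hash lookup instead of an inner scan
--     result = [[a[0], bid] for a in arr1 for bid in ids_by_val.get(value - a[1], [])]
--     if result:
--         return result
--     # fallback: best positive sum below value, via sorted values + binary search
--     vals = sorted(ids_by_val)
--     best_sum = 0
--     best_pair = [[]]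
--     for a in arr1:
--         k = bisect_left(vals, value - a[1])
--         if k:
--             s = a[1] + vals[k - 1]
--             if s > best_sum:
--                 best_sum = s
--                 best_pair = [[a[0], ids_by_val[vals[k - 1]][0]]]
--     return best_pair
-- ===== Notes on version B (the rewrite author's own statement) =====
-- stated objective: faster
-- what changed: Replaces A's nested O(n*m) scan with running record-keeping by a hash index of arr2 (value -> ids, built once) looked up per arr1 row for the exact matches, and by sorted distinct arr2 values plus bisect binary search per arr1 row for the best-positive-sum-below-value fallback.
-- outside the precondition, e.g. on functionCheck(5, [], [[1]]): A returns [[]], B raises IndexError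
import Mathlib
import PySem

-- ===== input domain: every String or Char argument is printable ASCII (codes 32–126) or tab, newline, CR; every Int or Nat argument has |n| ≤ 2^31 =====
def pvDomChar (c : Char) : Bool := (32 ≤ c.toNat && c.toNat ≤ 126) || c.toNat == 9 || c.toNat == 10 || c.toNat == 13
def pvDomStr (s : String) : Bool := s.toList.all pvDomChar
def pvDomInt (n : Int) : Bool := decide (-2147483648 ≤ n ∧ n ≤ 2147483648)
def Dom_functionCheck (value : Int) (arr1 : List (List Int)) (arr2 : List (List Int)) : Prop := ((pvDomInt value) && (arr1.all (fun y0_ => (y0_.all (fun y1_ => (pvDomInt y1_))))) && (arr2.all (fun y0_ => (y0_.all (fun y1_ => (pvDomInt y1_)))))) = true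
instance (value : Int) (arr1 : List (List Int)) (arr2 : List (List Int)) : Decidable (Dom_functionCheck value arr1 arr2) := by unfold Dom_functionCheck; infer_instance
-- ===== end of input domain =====

-- B replaces A's O(n*m) nested scan by a hash index of arr2 (value -> ids) for the exact
-- matches and sorted distinct values + binary search for the best-sum-below-value fallback.

-- ===== PORT A =====
def functionCheck (value : Int) (arr1 : List (List Int)) (arr2 : List (List Int)) : List (List Int) :=
  -- state st = (result, secondResult, maxvalue)
  let st :=
    (PySem.List.pyRange 0 (arr1.length : Int) 1).foldl
      (fun (st : List (List Int) × List (List Int) × Int) i =>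
        let a := PySem.List.pyGetD arr1 i []
        let target := value - PySem.List.pyGetD a 1 0
        (PySem.List.pyRange 0 (arr2.length : Int) 1).foldl
          (fun (st : List (List Int) × List (List Int) × Int) j =>
            let b := PySem.List.pyGetD arr2 j []
            if target = PySem.List.pyGetD b 1 0 then
              (st.1 ++ [[PySem.List.pyGetD a 0 0, PySem.List.pyGetD b 0 0]], st.2.1, st.2.2)
            else if PySem.List.pyGetD b 1 0 < target then
              let sum := PySem.List.pyGetD a 1 0 + PySem.List.pyGetD b 1 0
              if st.2.2 < sum then
                (st.1, st.2.1 ++ [[PySem.List.pyGetD a 0 0, PySem.List.pyGetD b 0 0]], sum)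
              else st
            else st)
          st)
      (([] : List (List Int)), ([] : List (List Int)), (0 : Int))
  if st.1 ≠ [] then st.1
  else if st.2.1 ≠ [] then [PySem.List.pyGetD st.2.1 (-1) []]   -- secondResult[-1]
  else [[]]

-- ===== PORT B =====
def functionCheck_alt (value : Int) (arr1 : List (List Int)) (arr2 : List (List Int)) : List (List Int) :=
  -- ids_by_val: arr2's value column -> its ids, in arr2 order (setdefault-append loop)
  let d := arr2.foldl
    (fun (d : PySem.Dict Int (List Int)) b =>
      d.modify (PySem.List.pyGetD b 1 0) [] (fun l => l ++ [PySem.List.pyGetD b 0 0]))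
    PySem.Dict.empty
  let result := arr1.flatMap (fun a =>
    (d.getD (value - PySem.List.pyGetD a 1 0) []).map
      (fun bid => [PySem.List.pyGetD a 0 0, bid]))
  if result ≠ [] then result
  else
    let vals := PySem.List.sorted d.keys (fun x => x) false   -- sorted(ids_by_val)
    let st := arr1.foldl
      (fun (st : Int × List (List Int)) a =>
        -- bisect.bisect_left on the sorted vals (PySem.List.bisectLeft is the library port)
        let k := PySem.List.bisectLeft vals (value - PySem.List.pyGetD a 1 0)
        if k ≠ 0 then
          let v := PySem.List.pyGetD vals ((k : Int) - 1) 0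
          let s := PySem.List.pyGetD a 1 0 + v
          if st.1 < s then
            (s, [[PySem.List.pyGetD a 0 0, PySem.List.pyGetD (d.getD v []) 0 0]])
          else st
        else st)
      ((0 : Int), ([[]] : List (List Int)))   -- (best_sum, best_pair)
    st.2

-- ===== PRECONDITION & SPEC =====
-- Pre_ excludes exactly the inputs holding a sublist shorter than 2, on which Python A
-- raises IndexError (arr1[i][1] / arr2[j][1]) — except the corner arr1 = [] with a short
-- sublist in arr2, where A returns [[]] without touching arr2 but B, which indexes arr2
-- up front, raises IndexError itself; that corner is excluded for B's sake.
def Pre_functionCheck (value : Int) (arr1 : List (List Int)) (arr2 : List (List Int)) : Prop :=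
  (∀ l ∈ arr1, 2 ≤ l.length) ∧ (∀ l ∈ arr2, 2 ≤ l.length)
instance (value : Int) (arr1 : List (List Int)) (arr2 : List (List Int)) : Decidable (Pre_functionCheck value arr1 arr2) := by unfold Pre_functionCheck; infer_instance
def pvWitness_functionCheck : Int × List (List Int) × List (List Int) :=
  (7, [[1, 3], [2, 4]], [[5, 4], [6, 2]])

def Spec_functionCheck (value : Int) (arr1 : List (List Int)) (arr2 : List (List Int)) (out : List (List Int)) : Prop := out = functionCheck_alt value arr1 arr2
instance (value : Int) (arr1 : List (List Int)) (arr2 : List (List Int)) (out : List (List Int)) : Decidable (Spec_functionCheck value arr1 arr2 out) := by unfold Spec_functionCheck; infer_instance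

-- ===== CLAIM (what is proved, stated in full; the proofs are below) =====
def Claim_equal_functionCheck : Prop := ∀ (value : Int) (arr1 : List (List Int)) (arr2 : List (List Int)), Dom_functionCheck value arr1 arr2 → Pre_functionCheck value arr1 arr2 → Spec_functionCheck value arr1 arr2 (functionCheck value arr1 arr2)

-- ===== LEMMAS AND PROOFS =====

-- the (sum, pair) product of one row of arr1 with one row of arr2
def pvPf (a b : List Int) : Int × List Int :=
  (PySem.List.pyGetD a 1 0 + PySem.List.pyGetD b 1 0,
   [PySem.List.pyGetD a 0 0, PySem.List.pyGetD b 0 0])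

-- the full pair stream, in A's nested-loop order
def pvPairs (arr1 arr2 : List (List Int)) : List (Int × List Int) :=
  arr1.flatMap (fun a => arr2.map (pvPf a))

-- A's loop body as a step over one (sum, pair) element
def pvStep (value : Int) (st : List (List Int) × List (List Int) × Int)
    (sp : Int × List Int) : List (List Int) × List (List Int) × Int :=
  if sp.1 = value then (st.1 ++ [sp.2], st.2.1, st.2.2)
  else if sp.1 < value then
    if st.2.2 < sp.1 then (st.1, st.2.1 ++ [sp.2], sp.1) else st
  else st

-- the record sequence of A's secondary accumulator, over the pair stream
def pvRecs (value : Int) (m : Int) : List (Int × List Int) → List (Int × List Int)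
  | [] => []
  | sp :: t => if sp.1 < value ∧ m < sp.1 then sp :: pvRecs value sp.1 t else pvRecs value m t

-- the running maximum of A's secondary accumulator
def pvMx (value : Int) (m : Int) : List (Int × List Int) → Int
  | [] => m
  | sp :: t => pvMx value (if sp.1 < value ∧ m < sp.1 then sp.1 else m) t

theorem pvFoldAll (value : Int) (p : List (Int × List Int)) :
    ∀ (res sec : List (List Int)) (m : Int),
      p.foldl (pvStep value) (res, sec, m) =
        (res ++ (p.filter (fun sp => sp.1 == value)).map (fun sp => sp.2),
         sec ++ (pvRecs value m p).map (fun sp => sp.2),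
         pvMx value m p) := by
  induction p with
  | nil => intro res sec m; simp [pvRecs, pvMx]
  | cons sp t ih =>
    intro res sec m
    simp only [List.foldl_cons, pvStep, pvRecs, pvMx, List.filter_cons]
    by_cases h1 : sp.1 = value
    · simp [h1, ih]
    · by_cases h2 : sp.1 < value
      · by_cases h3 : m < sp.1
        · simp [h1, h2, h3, ih]
        · simp [h1, h2, h3, ih]
      · simp [h1, h2, ih]

-- Python max(x::t, key) keeps the earlier element on key ties
theorem pvMax?_cons {α : Type} (key : α → Int) (x : α) (t : List α) :
    PySem.List.max? (x :: t) key =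
      some (match PySem.List.max? t key with
            | none => x
            | some b => if key x < key b then b else x) := by
  show List.foldl _ (some x) t = _
  induction t generalizing x with
  | nil => simp [PySem.List.max?]
  | cons y t ih =>
    show List.foldl _ _ t = _
    have hy : PySem.List.max? (y :: t) key = List.foldl _ (some y) t := rfl
    by_cases h : key x < key y
    · simp only [if_pos h, ih y, hy]
      cases hb : PySem.List.max? t key with
      | none => simp [h]
      | some b =>
        simp only []
        by_cases h2 : key y < key b
        · simp [h2, show key x < key b by omega]
        · by_cases h3 : key x < key b <;> simp [h2, h]
    · simp only [if_neg h, ih x, hy, ih]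
      cases hb : PySem.List.max? t key with
      | none => simp [h]
      | some b =>
        simp only []
        by_cases h2 : key y < key b
        · by_cases h3 : key x < key b <;> simp [h2, h3] <;> omega
        · by_cases h3 : key x < key y <;> simp [h2, h3] <;> omega

-- raising the lower threshold of the filter = keeping the max only when it beats it
theorem pvFiltMax (value : Int) (t : List (Int × List Int)) :
    ∀ (m s : Int), m < s →
      (match PySem.List.max? (t.filter (fun x => decide (m < x.1 ∧ x.1 < value))) (fun sp => sp.1) with
       | none => none
       | some b => if s < b.1 then some b else none)
      = PySem.List.max? (t.filter (fun x => decide (s < x.1 ∧ x.1 < value))) (fun sp => sp.1) := by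
  induction t with
  | nil => intro m s hms; simp [PySem.List.max?]
  | cons x t ih =>
    intro m s hms
    have hih := ih m s hms
    by_cases hxm : m < x.1 ∧ x.1 < value
    · have e1 : (x :: t).filter (fun y => decide (m < y.1 ∧ y.1 < value))
          = x :: t.filter (fun y => decide (m < y.1 ∧ y.1 < value)) := by
        simp [hxm]
      by_cases hxs : s < x.1
      · have e2 : (x :: t).filter (fun y => decide (s < y.1 ∧ y.1 < value))
            = x :: t.filter (fun y => decide (s < y.1 ∧ y.1 < value)) := by
          simp [hxs, hxm.2]
        rw [e1, e2, pvMax?_cons, pvMax?_cons]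
        cases hb : PySem.List.max? (t.filter (fun y => decide (m < y.1 ∧ y.1 < value))) (fun sp => sp.1) with
        | none =>
          rw [hb] at hih; simp only [] at hih
          rw [← hih]; simp [hxs]
        | some b =>
          rw [hb] at hih; simp only [] at hih
          rw [← hih]
          by_cases h2 : s < b.1
          · simp only [if_pos h2]
            by_cases h3 : x.1 < b.1 <;> simp only [if_pos, h3] <;>
              simp [h2, hxs]
          · simp only [if_neg h2]
            simp [show ¬ x.1 < b.1 by omega, hxs]
      · have e2 : (x :: t).filter (fun y => decide (s < y.1 ∧ y.1 < value))
            = t.filter (fun y => decide (s < y.1 ∧ y.1 < value)) := by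
          simp [List.filter_cons]; omega
        rw [e1, e2, pvMax?_cons]
        cases hb : PySem.List.max? (t.filter (fun y => decide (m < y.1 ∧ y.1 < value))) (fun sp => sp.1) with
        | none =>
          rw [hb] at hih; simp only [] at hih
          rw [← hih]; simp [show ¬ s < x.1 by omega]
        | some b =>
          rw [hb] at hih; simp only [] at hih
          rw [← hih]
          by_cases h2 : s < b.1
          · simp only [if_pos h2]
            simp [show x.1 < b.1 by omega, h2]
          · simp only [if_neg h2]
            by_cases h3 : x.1 < b.1 <;> simp [h3] <;> omega
    · have e1 : (x :: t).filter (fun y => decide (m < y.1 ∧ y.1 < value))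
          = t.filter (fun y => decide (m < y.1 ∧ y.1 < value)) := by
        simp [hxm]
      have e2 : (x :: t).filter (fun y => decide (s < y.1 ∧ y.1 < value))
          = t.filter (fun y => decide (s < y.1 ∧ y.1 < value)) := by
        simp [List.filter_cons]; omega
      rw [e1, e2]; exact hih

-- last record = Python max with key over the thresholded filter
theorem pvRecsLast (value : Int) (p : List (Int × List Int)) :
    ∀ m : Int,
      (pvRecs value m p).getLast? =
        PySem.List.max? (p.filter (fun sp => decide (m < sp.1 ∧ sp.1 < value))) (fun sp => sp.1) := by
  induction p with
  | nil => intro m; simp [pvRecs, PySem.List.max?]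
  | cons sp t ih =>
    intro m
    by_cases h : sp.1 < value ∧ m < sp.1
    · have e1 : (sp :: t).filter (fun y => decide (m < y.1 ∧ y.1 < value))
          = sp :: t.filter (fun y => decide (m < y.1 ∧ y.1 < value)) := by
        simp [h.1, h.2]
      have erecs : pvRecs value m (sp :: t) = sp :: pvRecs value sp.1 t := by
        simp [pvRecs, h]
      rw [erecs, e1, pvMax?_cons, List.getLast?_cons, ih sp.1]
      have hfm := pvFiltMax value t m sp.1 h.2
      cases hb : PySem.List.max? (t.filter (fun y => decide (m < y.1 ∧ y.1 < value))) (fun sp => sp.1) with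
      | none =>
        rw [hb] at hfm; simp only [] at hfm
        rw [← hfm]; simp
      | some b =>
        rw [hb] at hfm; simp only [] at hfm
        rw [← hfm]
        by_cases h2 : sp.1 < b.1
        · simp only [if_pos h2]; simp
        · simp only [if_neg h2]; simp
    · have e1 : (sp :: t).filter (fun y => decide (m < y.1 ∧ y.1 < value))
          = t.filter (fun y => decide (m < y.1 ∧ y.1 < value)) := by
        simp [List.filter_cons]; omega
      have erecs : pvRecs value m (sp :: t) = pvRecs value m t := by
        simp [pvRecs, h]
      rw [erecs, e1]; exact ih m

-- A, characterised as a pipeline over the pair stream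
theorem pvAChar (value : Int) (arr1 arr2 : List (List Int)) :
    functionCheck value arr1 arr2 =
      (let pairs := pvPairs arr1 arr2
       let exact := (pairs.filter (fun sp => sp.1 == value)).map (fun sp => sp.2)
       if exact ≠ [] then exact
       else
         match PySem.List.max? (pairs.filter (fun sp => decide (0 < sp.1 ∧ sp.1 < value)))
             (fun sp => sp.1) with
         | some best => [best.2]
         | none => [[]]) := by
  unfold functionCheck
  rw [PySem.List.foldl_pyRange_zero_pyGetD' arr1 ([] : List Int)
    (fun (st : List (List Int) × List (List Int) × Int) (a : List Int) =>
      let target := value - PySem.List.pyGetD a 1 0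
      (PySem.List.pyRange 0 (arr2.length : Int) 1).foldl
        (fun (st : List (List Int) × List (List Int) × Int) j =>
          let b := PySem.List.pyGetD arr2 j []
          if target = PySem.List.pyGetD b 1 0 then
            (st.1 ++ [[PySem.List.pyGetD a 0 0, PySem.List.pyGetD b 0 0]], st.2.1, st.2.2)
          else if PySem.List.pyGetD b 1 0 < target then
            let sum := PySem.List.pyGetD a 1 0 + PySem.List.pyGetD b 1 0
            if st.2.2 < sum then
              (st.1, st.2.1 ++ [[PySem.List.pyGetD a 0 0, PySem.List.pyGetD b 0 0]], sum)
            else st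
          else st) st)
    (([] : List (List Int)), ([] : List (List Int)), (0 : Int))]
  have hinner : ∀ (a : List Int) (st : List (List Int) × List (List Int) × Int),
      (PySem.List.pyRange 0 (arr2.length : Int) 1).foldl
        (fun (st : List (List Int) × List (List Int) × Int) j =>
          let b := PySem.List.pyGetD arr2 j []
          if value - PySem.List.pyGetD a 1 0 = PySem.List.pyGetD b 1 0 then
            (st.1 ++ [[PySem.List.pyGetD a 0 0, PySem.List.pyGetD b 0 0]], st.2.1, st.2.2)
          else if PySem.List.pyGetD b 1 0 < value - PySem.List.pyGetD a 1 0 then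
            if st.2.2 < PySem.List.pyGetD a 1 0 + PySem.List.pyGetD b 1 0 then
              (st.1, st.2.1 ++ [[PySem.List.pyGetD a 0 0, PySem.List.pyGetD b 0 0]],
               PySem.List.pyGetD a 1 0 + PySem.List.pyGetD b 1 0)
            else st
          else st) st
      = (arr2.map (pvPf a)).foldl (pvStep value) st := by
    intro a st
    rw [PySem.List.foldl_pyRange_zero_pyGetD' arr2 ([] : List Int)
      (fun (st : List (List Int) × List (List Int) × Int) (b : List Int) =>
        if value - PySem.List.pyGetD a 1 0 = PySem.List.pyGetD b 1 0 then
          (st.1 ++ [[PySem.List.pyGetD a 0 0, PySem.List.pyGetD b 0 0]], st.2.1, st.2.2)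
        else if PySem.List.pyGetD b 1 0 < value - PySem.List.pyGetD a 1 0 then
          if st.2.2 < PySem.List.pyGetD a 1 0 + PySem.List.pyGetD b 1 0 then
            (st.1, st.2.1 ++ [[PySem.List.pyGetD a 0 0, PySem.List.pyGetD b 0 0]],
             PySem.List.pyGetD a 1 0 + PySem.List.pyGetD b 1 0)
          else st
        else st) st, List.foldl_map]
    congr 1
    funext st b
    unfold pvStep pvPf
    by_cases h1 : value - PySem.List.pyGetD a 1 0 = PySem.List.pyGetD b 1 0
    · simp only [h1, if_pos, show PySem.List.pyGetD a 1 0 + PySem.List.pyGetD b 1 0 = value by omega]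
    · have h1' : ¬ PySem.List.pyGetD a 1 0 + PySem.List.pyGetD b 1 0 = value := by omega
      by_cases h2 : PySem.List.pyGetD b 1 0 < value - PySem.List.pyGetD a 1 0
      · simp only [h1, h1', if_false, h2, if_pos,
          show PySem.List.pyGetD a 1 0 + PySem.List.pyGetD b 1 0 < value by omega]
      · simp only [h1, h1', if_false, h2,
          show ¬ PySem.List.pyGetD a 1 0 + PySem.List.pyGetD b 1 0 < value by omega]
  simp only [hinner]
  rw [← List.foldl_flatMap]
  rw [show arr1.flatMap (fun a => arr2.map (pvPf a)) = pvPairs arr1 arr2 from rfl, pvFoldAll]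
  simp only [List.nil_append]
  set pairs := pvPairs arr1 arr2 with hpairs
  by_cases hex : (pairs.filter (fun sp => sp.1 == value)).map (fun sp => sp.2) = []
  · simp only [hex, ne_eq, not_true_eq_false, if_false]
    have hlast := pvRecsLast value pairs 0
    cases hb : PySem.List.max? (pairs.filter (fun sp => decide (0 < sp.1 ∧ sp.1 < value))) (fun sp => sp.1) with
    | none =>
      rw [hb] at hlast
      have : pvRecs value 0 pairs = [] := List.getLast?_eq_none_iff.mp hlast
      simp [this]
    | some best =>
      rw [hb] at hlast
      have hne : pvRecs value 0 pairs ≠ [] := by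
        intro h; rw [h] at hlast; simp at hlast
      have hmapne : (pvRecs value 0 pairs).map (fun sp => sp.2) ≠ [] := by
        simpa using hne
      simp only [hmapne, not_false_eq_true, if_pos]
      rw [PySem.List.pyGetD_neg_one _ ([] : List Int) hmapne]
      have h1 : ((pvRecs value 0 pairs).map (fun sp => sp.2)).getLast? = some best.2 := by
        rw [List.getLast?_map, hlast]; rfl
      have h2 := List.getLast?_eq_some_getLast hmapne
      rw [h2] at h1
      simp only [Option.some.injEq] at h1
      rw [h1]
  · simp only [hex, ne_eq, not_false_eq_true, if_pos]


-- ---- B-side characterisation ----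

-- B's grouping dict (ids_by_val) and its sorted key list
def pvD (arr2 : List (List Int)) : PySem.Dict Int (List Int) :=
  arr2.foldl
    (fun (d : PySem.Dict Int (List Int)) b =>
      d.modify (PySem.List.pyGetD b 1 0) [] (fun l => l ++ [PySem.List.pyGetD b 0 0]))
    PySem.Dict.empty

def pvVals (arr2 : List (List Int)) : List Int :=
  PySem.List.sorted (pvD arr2).keys (fun x => x) false

theorem pvDGetD (arr2 : List (List Int)) (c : Int) :
    (pvD arr2).getD c [] =
      (arr2.filter (fun b => PySem.List.pyGetD b 1 0 == c)).map
        (fun b => PySem.List.pyGetD b 0 0) := by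
  unfold pvD
  rw [show arr2.foldl
        (fun (d : PySem.Dict Int (List Int)) b =>
          d.modify (PySem.List.pyGetD b 1 0) [] (fun l => l ++ [PySem.List.pyGetD b 0 0]))
        PySem.Dict.empty
      = (arr2.map (fun b => (PySem.List.pyGetD b 1 0, PySem.List.pyGetD b 0 0))).foldl
          (fun d p => d.modify p.1 [] (fun l => l ++ [p.2])) PySem.Dict.empty
    from by rw [List.foldl_map]]
  rw [PySem.Dict.getD_foldl_modify_append]
  simp [List.filter_map, Function.comp_def]

theorem pvDKeys (arr2 : List (List Int)) :
    (pvD arr2).keys = PySem.Set.ofList (arr2.map (fun b => PySem.List.pyGetD b 1 0)) := by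
  unfold pvD
  rw [PySem.Dict.keys_foldl_modify_key arr2 (fun b => PySem.List.pyGetD b 1 0) []
      (fun _ b => (fun l => l ++ [PySem.List.pyGetD b 0 0])) PySem.Dict.empty]
  rw [PySem.Dict.keys_empty, PySem.Set.update_nil_left]

theorem pvValsSorted (arr2 : List (List Int)) : (pvVals arr2).Pairwise (· < ·) := by
  unfold pvVals; rw [pvDKeys]; exact PySem.List.sorted_ofList_pairwise_lt _

theorem pvValsMem (arr2 : List (List Int)) (v : Int) :
    v ∈ pvVals arr2 ↔ ∃ b ∈ arr2, PySem.List.pyGetD b 1 0 = v := by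
  unfold pvVals
  rw [PySem.List.mem_sorted, pvDKeys, PySem.Set.mem_ofList, List.mem_map]

-- the value B's binary search finds: the largest arr2 value below t, if any
def pvBest (arr2 : List (List Int)) (t : Int) : Option Int :=
  let k := PySem.List.bisectLeft (pvVals arr2) t
  if k ≠ 0 then some (PySem.List.pyGetD (pvVals arr2) ((k : Int) - 1) 0) else none

theorem pvBestNone (arr2 : List (List Int)) (t : Int) (h : pvBest arr2 t = none) :
    ∀ b ∈ arr2, ¬ PySem.List.pyGetD b 1 0 < t := by
  have hk : PySem.List.bisectLeft (pvVals arr2) t = 0 := by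
    by_contra hk; unfold pvBest at h; simp [hk] at h
  have hspec := PySem.List.bisectLeft_spec (pvVals arr2) t
    ((pvValsSorted arr2).imp le_of_lt)
  intro b hb hlt
  have hmem : PySem.List.pyGetD b 1 0 ∈ pvVals arr2 :=
    (pvValsMem arr2 _).mpr ⟨b, hb, rfl⟩
  obtain ⟨j, hj, hje⟩ := List.mem_iff_getElem.mp hmem
  have := hspec.2.2 j hj (by omega)
  omega

theorem pvBestSome (arr2 : List (List Int)) (t : Int) (v : Int) (h : pvBest arr2 t = some v) :
    (∃ b ∈ arr2, PySem.List.pyGetD b 1 0 = v) ∧ v < t ∧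
      ∀ b ∈ arr2, PySem.List.pyGetD b 1 0 < t → PySem.List.pyGetD b 1 0 ≤ v := by
  have hk : PySem.List.bisectLeft (pvVals arr2) t ≠ 0 := by
    by_contra hk; unfold pvBest at h; simp [hk] at h
  have hval : v = PySem.List.pyGetD (pvVals arr2) ((PySem.List.bisectLeft (pvVals arr2) t : Int) - 1) 0 := by
    unfold pvBest at h; simp [hk] at h; omega
  have hspec := PySem.List.bisectLeft_spec (pvVals arr2) t
    ((pvValsSorted arr2).imp le_of_lt)
  set k := PySem.List.bisectLeft (pvVals arr2) t with hkdef
  have hcast : ((k : Int) - 1) = ((k - 1 : Nat) : Int) := by omega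
  have hlen : k - 1 < (pvVals arr2).length := by omega
  have hv : v = (pvVals arr2)[k - 1] := by
    rw [hval, hcast, PySem.List.pyGetD_natCast, List.getD_eq_getElem _ _ hlen]
  have hpw := List.pairwise_iff_getElem.mp (pvValsSorted arr2)
  refine ⟨?_, ?_, ?_⟩
  · exact (pvValsMem arr2 v).mp (by rw [hv]; exact List.getElem_mem hlen)
  · rw [hv]; exact hspec.2.1 (k - 1) hlen (by omega)
  · intro b hb hlt
    have hmem : PySem.List.pyGetD b 1 0 ∈ pvVals arr2 :=
      (pvValsMem arr2 _).mpr ⟨b, hb, rfl⟩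
    obtain ⟨j, hj, hje⟩ := List.mem_iff_getElem.mp hmem
    have hjk : j < k := by
      by_contra hge
      have := hspec.2.2 j hj (by omega)
      omega
    rcases Nat.lt_or_ge j (k - 1) with hjlt | hjge
    · have := hpw j (k - 1) hj hlen hjlt
      omega
    · have : j = k - 1 := by omega
      subst this; omega

-- Python max on a list whose first maximal element is x (earlier wins on key ties)
theorem pvMaxFirst {α : Type} (key : α → Int) (x : α) (p s : List α)
    (hp : ∀ y ∈ p, key y < key x) (hs : ∀ y ∈ s, key y ≤ key x) :
    PySem.List.max? (p ++ x :: s) key = some x := by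
  induction p with
  | nil =>
    simp only [List.nil_append]
    rw [pvMax?_cons]
    cases hb : PySem.List.max? s key with
    | none => rfl
    | some b =>
      have hle := hs b (PySem.List.max?_mem hb)
      simp [show ¬ key x < key b by omega]
  | cons y p ih =>
    have hy := hp y (by simp)
    rw [List.cons_append, pvMax?_cons, ih (fun z hz => hp z (by simp [hz]))]
    simp [hy]

-- split a list at the first element satisfying p
theorem pvFirstSplit {α : Type} (p : α → Bool) (l : List α) (h : ∃ x ∈ l, p x = true) :
    ∃ u x w, l = u ++ x :: w ∧ p x = true ∧ ∀ y ∈ u, p y = false := by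
  induction l with
  | nil => simp at h
  | cons a t ih =>
    by_cases ha : p a = true
    · exact ⟨[], a, t, by simp, ha, by simp⟩
    · obtain ⟨x, hx, hpx⟩ := h
      rcases List.mem_cons.mp hx with rfl | hxt
      · exact absurd hpx ha
      · obtain ⟨u, x', w, he, hp', hu⟩ := ih ⟨x, hxt, hpx⟩
        refine ⟨a :: u, x', w, by simp [he], hp', ?_⟩
        intro y hy
        rcases List.mem_cons.mp hy with rfl | hyu
        · simpa using ha
        · exact hu y hyu

-- the per-row candidate list: degenerate when no positive sum below value exists
theorem pvLaNil (value : Int) (arr2 : List (List Int)) (a : List Int)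
    (h : ∀ b ∈ arr2, PySem.List.pyGetD b 1 0 < value - PySem.List.pyGetD a 1 0 →
          PySem.List.pyGetD a 1 0 + PySem.List.pyGetD b 1 0 ≤ 0) :
    (arr2.map (pvPf a)).filter (fun sp => decide (0 < sp.1 ∧ sp.1 < value)) = [] := by
  rw [List.filter_eq_nil_iff]
  intro sp hsp
  obtain ⟨b, hb, rfl⟩ := List.mem_map.mp hsp
  have := h b hb
  simp only [pvPf, decide_eq_true_eq, not_and]
  intro h1 h2
  omega

-- the per-row Python max equals B's binary-search candidate
theorem pvLaMax (value : Int) (arr2 : List (List Int)) (a : List Int) (v : Int)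
    (hv : pvBest arr2 (value - PySem.List.pyGetD a 1 0) = some v)
    (hpos : 0 < PySem.List.pyGetD a 1 0 + v) :
    PySem.List.max? ((arr2.map (pvPf a)).filter (fun sp => decide (0 < sp.1 ∧ sp.1 < value)))
        (fun sp => sp.1)
      = some (PySem.List.pyGetD a 1 0 + v,
              [PySem.List.pyGetD a 0 0, PySem.List.pyGetD ((pvD arr2).getD v []) 0 0]) := by
  obtain ⟨⟨b0, hb0, hb0v⟩, hvt, hmax⟩ := pvBestSome arr2 _ v hv
  obtain ⟨u, bs, w, hsplit, hpb, hu⟩ :=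
    pvFirstSplit (fun b => PySem.List.pyGetD b 1 0 == v) arr2 ⟨b0, hb0, by simp only [hb0v, beq_self_eq_true]⟩
  have hbv : PySem.List.pyGetD bs 1 0 = v := by simpa using hpb
  have hid : PySem.List.pyGetD ((pvD arr2).getD v []) 0 0 = PySem.List.pyGetD bs 0 0 := by
    rw [pvDGetD, hsplit]
    have hufilter : u.filter (fun b => PySem.List.pyGetD b 1 0 == v) = [] := by
      rw [List.filter_eq_nil_iff]; intro y hy; simp [hu y hy]
    rw [List.filter_append, hufilter, List.filter_cons]
    simp only [hbv, beq_self_eq_true, if_pos, List.nil_append, List.map_cons]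
    rw [show ((0 : Int) = ((0 : Nat) : Int)) from rfl, PySem.List.pyGetD_natCast]
    rfl
  have hPbs : (decide (0 < (pvPf a bs).1 ∧ (pvPf a bs).1 < value)) = true := by
    simp only [pvPf, decide_eq_true_eq]
    constructor <;> omega
  rw [hid, hsplit, List.map_append, List.map_cons, List.filter_append, List.filter_cons, hPbs]
  simp only [if_pos]
  have hx : pvPf a bs =
      (PySem.List.pyGetD a 1 0 + v, [PySem.List.pyGetD a 0 0, PySem.List.pyGetD bs 0 0]) := by
    simp [pvPf, hbv]
  rw [← hx]
  apply pvMaxFirst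
  · intro y hy
    obtain ⟨hy1, hy2⟩ := List.mem_filter.mp hy
    obtain ⟨b, hb, rfl⟩ := List.mem_map.mp hy1
    have hbarr : b ∈ arr2 := by rw [hsplit]; simp [hb]
    have hP := of_decide_eq_true hy2
    have hle := hmax b hbarr (by simp only [pvPf] at hP; omega)
    have hne : PySem.List.pyGetD b 1 0 ≠ v := by simpa using hu b hb
    simp only [pvPf, hbv]
    omega
  · intro y hy
    obtain ⟨hy1, hy2⟩ := List.mem_filter.mp hy
    obtain ⟨b, hb, rfl⟩ := List.mem_map.mp hy1
    have hbarr : b ∈ arr2 := by rw [hsplit]; simp [hb]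
    have hP := of_decide_eq_true hy2
    have hle := hmax b hbarr (by simp only [pvPf] at hP; omega)
    simp only [pvPf, hbv]
    omega

-- Python's max over concatenation, earlier element winning ties
def pvMerge (x y : Option (Int × List Int)) : Option (Int × List Int) :=
  match x, y with
  | none, o => o
  | some a, none => some a
  | some a, some b => if a.1 < b.1 then some b else some a

theorem pvMerge_none_right (x : Option (Int × List Int)) : pvMerge x none = x := by
  cases x <;> rfl

theorem pvMax?_append (l1 l2 : List (Int × List Int)) :
    PySem.List.max? (l1 ++ l2) (fun sp => sp.1) =
      pvMerge (PySem.List.max? l1 (fun sp => sp.1)) (PySem.List.max? l2 (fun sp => sp.1)) := by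
  induction l1 with
  | nil => simp [PySem.List.max?, pvMerge]
  | cons x t ih =>
    rw [List.cons_append, pvMax?_cons, pvMax?_cons, ih]
    cases h1 : PySem.List.max? t (fun sp => sp.1) with
    | none =>
      cases h2 : PySem.List.max? l2 (fun sp => sp.1) with
      | none => simp [pvMerge]
      | some b => by_cases h : x.1 < b.1 <;> simp [pvMerge, h]
    | some b =>
      cases h2 : PySem.List.max? l2 (fun sp => sp.1) with
      | none => rw [pvMerge_none_right, pvMerge_none_right]
      | some c =>
        by_cases hbc : b.1 < c.1 <;> by_cases hxb : x.1 < b.1 <;>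
          by_cases hxc : x.1 < c.1 <;> simp [pvMerge, hbc, hxb, hxc] <;> omega

theorem pvMerge_assoc (x y z : Option (Int × List Int)) :
    pvMerge (pvMerge x y) z = pvMerge x (pvMerge y z) := by
  cases x with
  | none => simp [pvMerge]
  | some a =>
    cases y with
    | none => simp [pvMerge]
    | some b =>
      cases z with
      | none => rw [pvMerge_none_right, pvMerge_none_right]
      | some c =>
        by_cases hab : a.1 < b.1 <;> by_cases hbc : b.1 < c.1 <;>
          by_cases hac : a.1 < c.1 <;> simp [pvMerge, hab, hbc, hac] <;> omega

theorem pvFoldMergeFlat (f : List Int → List (Int × List Int)) (l : List (List Int)) :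
    ∀ acc, l.foldl (fun acc a => pvMerge acc (PySem.List.max? (f a) (fun sp => sp.1))) acc
      = pvMerge acc (PySem.List.max? (l.flatMap f) (fun sp => sp.1)) := by
  induction l with
  | nil => intro acc; cases acc <;> simp [pvMerge, PySem.List.max?]
  | cons a t ih =>
    intro acc
    rw [List.foldl_cons, ih, List.flatMap_cons, pvMax?_append, pvMerge_assoc]

-- invariant tying B's (best_sum, best_pair) state to the Python max over the pairs seen
def pvRel (st : Int × List (List Int)) (acc : Option (Int × List Int)) : Prop :=
  (acc = none → st = (0, [[]])) ∧ (∀ b, acc = some b → st = (b.1, [b.2]) ∧ 0 < b.1)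

theorem pvFoldB (value : Int) (arr2 : List (List Int)) :
    ∀ (arr1 : List (List Int)) (st : Int × List (List Int)) (acc : Option (Int × List Int)),
      pvRel st acc →
      pvRel
        (arr1.foldl (fun (st : Int × List (List Int)) a =>
          let k := PySem.List.bisectLeft (pvVals arr2) (value - PySem.List.pyGetD a 1 0)
          if k ≠ 0 then
            let v := PySem.List.pyGetD (pvVals arr2) ((k : Int) - 1) 0
            let s := PySem.List.pyGetD a 1 0 + v
            if st.1 < s then
              (s, [[PySem.List.pyGetD a 0 0, PySem.List.pyGetD ((pvD arr2).getD v []) 0 0]])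
            else st
          else st) st)
        (arr1.foldl (fun acc a => pvMerge acc (PySem.List.max?
            ((arr2.map (pvPf a)).filter (fun sp => decide (0 < sp.1 ∧ sp.1 < value)))
            (fun sp => sp.1))) acc) := by
  intro arr1
  induction arr1 with
  | nil => intro st acc h; exact h
  | cons a t ih =>
    intro st acc h
    rw [List.foldl_cons, List.foldl_cons]
    apply ih
    have hst1 : 0 ≤ st.1 := by
      cases hacc : acc with
      | none => rw [h.1 hacc]
      | some b => rw [(h.2 b hacc).1]; exact le_of_lt (h.2 b hacc).2
    cases hbv : pvBest arr2 (value - PySem.List.pyGetD a 1 0) with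
    | none =>
      have hk : PySem.List.bisectLeft (pvVals arr2) (value - PySem.List.pyGetD a 1 0) = 0 := by
        by_contra hk; unfold pvBest at hbv; simp [hk] at hbv
      have hnil := pvLaNil value arr2 a
        (fun b hb hlt => absurd hlt (pvBestNone arr2 _ hbv b hb))
      simp only [hk, ne_eq, not_true_eq_false, if_false, hnil]
      have : PySem.List.max? ([] : List (Int × List Int)) (fun sp => sp.1) = none := rfl
      rw [this]
      cases acc <;> simpa [pvMerge] using h
    | some v =>
      have hk : PySem.List.bisectLeft (pvVals arr2) (value - PySem.List.pyGetD a 1 0) ≠ 0 := by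
        by_contra hk; unfold pvBest at hbv; simp [hk] at hbv
      have hveq : PySem.List.pyGetD (pvVals arr2)
          ((PySem.List.bisectLeft (pvVals arr2) (value - PySem.List.pyGetD a 1 0) : Int) - 1) 0 = v := by
        unfold pvBest at hbv; simp [hk] at hbv; exact hbv
      simp only [hk, ne_eq, not_false_eq_true, if_pos, hveq]
      by_cases hpos : 0 < PySem.List.pyGetD a 1 0 + v
      · rw [pvLaMax value arr2 a v hbv hpos]
        cases hacc : acc with
        | none =>
          have hstv := h.1 hacc
          subst hstv
          rw [if_pos (show ((0 : Int), ([[]] : List (List Int))).1 < PySem.List.pyGetD a 1 0 + v from hpos)]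
          refine ⟨fun hcon => absurd hcon (by simp [pvMerge]), ?_⟩
          intro c hc
          simp only [pvMerge, Option.some.injEq] at hc
          rw [← hc]
          exact ⟨rfl, hpos⟩
        | some b =>
          obtain ⟨hstv, hbpos⟩ := h.2 b hacc
          subst hstv
          by_cases hlt : ((b.1, [b.2]) : Int × List (List Int)).1 < PySem.List.pyGetD a 1 0 + v
          · rw [if_pos hlt]
            refine ⟨fun hcon => absurd hcon (by simp [pvMerge, show b.1 < PySem.List.pyGetD a 1 0 + v from hlt]), ?_⟩
            intro c hc
            simp only [pvMerge, show b.1 < PySem.List.pyGetD a 1 0 + v from hlt, if_pos, Option.some.injEq] at hc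
            rw [← hc]
            exact ⟨rfl, hpos⟩
          · rw [if_neg hlt]
            have hnlt : ¬ b.1 < PySem.List.pyGetD a 1 0 + v := hlt
            refine ⟨fun hcon => absurd hcon (by simp [pvMerge, hnlt]), ?_⟩
            intro c hc
            simp only [pvMerge, hnlt, if_false, Option.some.injEq] at hc
            rw [← hc]
            exact ⟨rfl, hbpos⟩
      · have hle : ∀ b ∈ arr2,
            PySem.List.pyGetD b 1 0 < value - PySem.List.pyGetD a 1 0 →
            PySem.List.pyGetD a 1 0 + PySem.List.pyGetD b 1 0 ≤ 0 := by
          intro b hb hlt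
          have := (pvBestSome arr2 _ v hbv).2.2 b hb hlt
          omega
        rw [pvLaNil value arr2 a hle]
        have hnostep : ¬ st.1 < PySem.List.pyGetD a 1 0 + v := by omega
        rw [if_neg hnostep]
        rw [show PySem.List.max? ([] : List (Int × List Int)) (fun sp => sp.1) = none from rfl]
        rw [pvMerge_none_right]
        exact h

-- B's exact-match list is the exact-sum slice of the pair stream
theorem pvExactEq (value : Int) (arr1 arr2 : List (List Int)) :
    arr1.flatMap (fun a => ((pvD arr2).getD (value - PySem.List.pyGetD a 1 0) []).map
        (fun bid => [PySem.List.pyGetD a 0 0, bid]))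
      = ((pvPairs arr1 arr2).filter (fun sp => sp.1 == value)).map (fun sp => sp.2) := by
  unfold pvPairs
  rw [List.filter_flatMap, List.map_flatMap]
  congr 1
  funext a
  rw [pvDGetD, List.map_map, List.filter_map, List.map_map]
  have hpred : ∀ b ∈ arr2,
      (PySem.List.pyGetD b 1 0 == value - PySem.List.pyGetD a 1 0)
        = (((fun sp => sp.1 == value) ∘ pvPf a) b) := by
    intro b _
    simp only [Function.comp_apply, pvPf]
    by_cases h : PySem.List.pyGetD b 1 0 = value - PySem.List.pyGetD a 1 0
    · rw [beq_iff_eq.mpr h, beq_iff_eq.mpr (show PySem.List.pyGetD a 1 0 + PySem.List.pyGetD b 1 0 = value by omega)]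
    · have h2 : PySem.List.pyGetD a 1 0 + PySem.List.pyGetD b 1 0 ≠ value := by omega
      rw [beq_eq_false_iff_ne.mpr h, beq_eq_false_iff_ne.mpr h2]
  rw [List.filter_congr hpred]
  congr 1

-- B, characterised as the same pipeline
theorem pvBChar (value : Int) (arr1 arr2 : List (List Int)) :
    functionCheck_alt value arr1 arr2 =
      (let pairs := pvPairs arr1 arr2
       let exact := (pairs.filter (fun sp => sp.1 == value)).map (fun sp => sp.2)
       if exact ≠ [] then exact
       else
         match PySem.List.max? (pairs.filter (fun sp => decide (0 < sp.1 ∧ sp.1 < value)))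
             (fun sp => sp.1) with
         | some best => [best.2]
         | none => [[]]) := by
  have hD : (arr2.foldl
      (fun (d : PySem.Dict Int (List Int)) b =>
        d.modify (PySem.List.pyGetD b 1 0) [] (fun l => l ++ [PySem.List.pyGetD b 0 0]))
      PySem.Dict.empty) = pvD arr2 := rfl
  have hV : PySem.List.sorted (pvD arr2).keys (fun x => x) false = pvVals arr2 := rfl
  simp only [functionCheck_alt]
  simp only [hD, hV]
  rw [pvExactEq]
  by_cases hex : ((pvPairs arr1 arr2).filter (fun sp => sp.1 == value)).map (fun sp => sp.2) = []
  · simp only [hex, ne_eq, not_true_eq_false, if_false]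
    have hrel := pvFoldB value arr2 arr1 ((0 : Int), ([[]] : List (List Int))) none
      ⟨fun _ => rfl, fun b hb => by cases hb⟩
    rw [pvFoldMergeFlat
      (fun a => (arr2.map (pvPf a)).filter (fun sp => decide (0 < sp.1 ∧ sp.1 < value)))
      arr1 none] at hrel
    have hflt : (pvPairs arr1 arr2).filter (fun sp => decide (0 < sp.1 ∧ sp.1 < value))
        = arr1.flatMap
            (fun a => (arr2.map (pvPf a)).filter (fun sp => decide (0 < sp.1 ∧ sp.1 < value))) := by
      unfold pvPairs; rw [List.filter_flatMap]
    rw [← hflt] at hrel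
    cases hM : PySem.List.max?
        ((pvPairs arr1 arr2).filter (fun sp => decide (0 < sp.1 ∧ sp.1 < value)))
        (fun sp => sp.1) with
    | none =>
      rw [hM] at hrel
      have := hrel.1 rfl
      rw [this]
    | some best =>
      rw [hM] at hrel
      have := (hrel.2 best rfl).1
      rw [this]
  · simp only [hex, ne_eq, not_false_eq_true, if_pos]

-- ===== VERDICT (by name: the statement is the Claim_ definition above) =====
theorem functionCheck_spec : Claim_equal_functionCheck := by
  intro value arr1 arr2 _ _
  unfold Spec_functionCheck
  rw [pvAChar, pvBChar]
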